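-- pv_equiv track=rewrite | github.com/Imaad-Daniels2903/Python_Projects | cyper_encryption/cypher.py | y_cord_cal
-- ===== SOURCE A (Python) =====
-- def y_cord_cal(user_input):
--     y_count = 0
--     y_state = True
--     y_cord_array = []
--     for i in range(len(user_input)):
--         if y_state:
--            y_cord_array.append(y_count)
--            y_count += 1
--            if y_count == 3:
--                y_state = False
--         else:
--             y_cord_array.append(y_count)
--             y_count -= 1
--             if y_count == 0:
--                 y_state = True
--     return y_cord_array
-- ===== SOURCE B (Python) =====
-- def y_cord_cal(user_input):
--     # closed form: triangle wave of period 6 (0,1,2,3,2,1)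
--     return [r if r <= 3 else 6 - r for r in (i % 6 for i in range(len(user_input)))]
-- ===== Notes on version B (the rewrite author's own statement) =====
-- stated objective: simpler
-- what changed: Replaced the stateful up/down counter-and-flag loop with a closed-form per-index formula (triangle wave of period 6 via i % 6), emitted by a list comprehension.
import Mathlib
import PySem

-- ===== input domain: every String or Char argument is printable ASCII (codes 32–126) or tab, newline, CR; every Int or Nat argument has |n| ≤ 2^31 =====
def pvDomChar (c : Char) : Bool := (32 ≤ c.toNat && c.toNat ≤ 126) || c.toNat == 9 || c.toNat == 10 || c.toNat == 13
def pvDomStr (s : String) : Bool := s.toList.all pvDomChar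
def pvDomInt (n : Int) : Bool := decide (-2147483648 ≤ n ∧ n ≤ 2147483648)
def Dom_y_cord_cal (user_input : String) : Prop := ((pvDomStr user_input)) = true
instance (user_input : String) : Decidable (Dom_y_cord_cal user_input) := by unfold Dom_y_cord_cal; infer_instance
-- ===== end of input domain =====

-- B replaces A's stateful up/down flag-and-counter loop by a closed-form per-index
-- triangle-wave formula (period 6); objective: simpler.


-- ===== PORT A =====
-- one iteration of A's loop body (state: y_count, y_state, y_cord_array)
def yStepA (s : Int × Bool × List Int) (_ : Nat) : Int × Bool × List Int :=
  match s with
  | (y_count, y_state, arr) =>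
    if y_state then
      let c := y_count + 1
      (c, if c = 3 then false else y_state, arr ++ [y_count])
    else
      let c := y_count - 1
      (c, if c = 0 then true else y_state, arr ++ [y_count])

def y_cord_cal (user_input : String) : List Int :=
  ((List.range user_input.toList.length).foldl yStepA (0, true, [])).2.2

-- ===== PORT B =====
-- per-index triangle-wave value
def yTri (i : Nat) : Int :=
  let r : Int := (i : Int) % 6
  if r ≤ 3 then r else 6 - r

def y_cord_cal_alt (user_input : String) : List Int :=
  (List.range user_input.toList.length).map yTri

-- ===== PRECONDITION & SPEC =====
def Spec_y_cord_cal (user_input : String) (out : List Int) : Prop := out = y_cord_cal_alt user_input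
instance (user_input : String) (out : List Int) : Decidable (Spec_y_cord_cal user_input out) := by unfold Spec_y_cord_cal; infer_instance

-- ===== CLAIM (what is proved, stated in full; the proofs are below) =====
def Claim_equal_y_cord_cal : Prop := ∀ (user_input : String), Dom_y_cord_cal user_input → Spec_y_cord_cal user_input (y_cord_cal user_input)

-- ===== LEMMAS AND PROOFS =====
-- loop invariant: after n iterations the counter is yTri n, the flag is (n % 6 < 3),
-- and the array is the triangle wave up to n
theorem y_loop_inv (n : Nat) :
    (List.range n).foldl yStepA (0, true, []) =
      (yTri n, decide (n % 6 < 3), (List.range n).map yTri) := by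
  induction n with
  | zero => simp [yTri]
  | succ n ih =>
    rw [List.range_succ, List.foldl_append, ih, List.map_append]
    have h6 : n % 6 = 0 ∨ n % 6 = 1 ∨ n % 6 = 2 ∨ n % 6 = 3 ∨ n % 6 = 4 ∨ n % 6 = 5 := by omega
    rcases h6 with h | h | h | h | h | h <;>
    · have h1 : (n + 1) % 6 = (n % 6 + 1) % 6 := by omega
      have hz : (n : Int) % 6 = (n % 6 : Nat) := by omega
      have hz1 : ((n : Nat) + 1 : Int) % 6 = ((n + 1) % 6 : Nat) := by omega
      simp [yStepA, yTri, h, h1, hz, hz1]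

-- ===== VERDICT (by name: the statement is the Claim_ definition above) =====
theorem y_cord_cal_spec : Claim_equal_y_cord_cal := by
  intro s _
  unfold Spec_y_cord_cal y_cord_cal y_cord_cal_alt
  rw [y_loop_inv]
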